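-- pv_equiv track=rewrite | github.com/davidpirogov/sopel-openweathermap | sopel_openweathermap/utils.py | is_location_combination_same_country
-- ===== SOURCE A (Python) =====
-- from typing import List, Tuple
--
-- def is_location_combination_same_country(
--     owm_locations: List[Tuple[int, str, str]]
-- ) -> bool:
--     """
--     Checks to see if the list of owm_locations is the same combination of city,country pairs
--     only distinguishable by place_id integers
--     """
--
--     if len(owm_locations) == 0:
--         return False
--
--     is_same_combination = True
--     first_location = owm_locations[0]
--     for location in owm_locations:
--         if location[1] != first_location[1] or location[2] != first_location[2]:
--             is_same_combination = False
--
--     return is_same_combination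
-- ===== SOURCE B (Python) =====
-- from typing import List, Tuple
--
-- def is_location_combination_same_country(
--     owm_locations: List[Tuple[int, str, str]]
-- ) -> bool:
--     pairs = {(loc[1], loc[2]) for loc in owm_locations}
--     return len(pairs) == 1
-- ===== Notes on version B (the rewrite author's own statement) =====
-- stated objective: simpler
-- what changed: B collects the distinct (city, country) pairs into a set and tests that its cardinality is 1, instead of A's compare-to-first loop toggling a boolean flag; the empty case falls out naturally.
import Mathlib
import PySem

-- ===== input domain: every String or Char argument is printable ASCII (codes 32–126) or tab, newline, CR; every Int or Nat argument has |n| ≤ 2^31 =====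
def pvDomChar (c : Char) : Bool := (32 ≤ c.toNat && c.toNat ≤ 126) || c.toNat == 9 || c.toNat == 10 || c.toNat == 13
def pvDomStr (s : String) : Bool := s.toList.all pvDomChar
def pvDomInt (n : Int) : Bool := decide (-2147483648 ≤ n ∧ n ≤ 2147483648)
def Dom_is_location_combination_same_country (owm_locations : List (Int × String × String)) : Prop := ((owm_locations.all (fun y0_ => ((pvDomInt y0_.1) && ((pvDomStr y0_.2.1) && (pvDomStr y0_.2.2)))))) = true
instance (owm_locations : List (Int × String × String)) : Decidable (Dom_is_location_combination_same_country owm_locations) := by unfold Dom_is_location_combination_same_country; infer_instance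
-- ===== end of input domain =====

-- B replaces A's compare-to-first boolean-flag loop by collecting the distinct
-- (city, country) pairs into a set and testing that its cardinality is 1 (simpler).

-- ===== PORT A =====
def is_location_combination_same_country (owm_locations : List (Int × String × String)) : Bool :=
  match owm_locations with
  | [] => false
  | first :: _ =>
    owm_locations.foldl
      (fun is_same_combination location =>
        if location.2.1 != first.2.1 || location.2.2 != first.2.2 then false
        else is_same_combination)
      true

-- ===== PORT B =====
def is_location_combination_same_country_alt (owm_locations : List (Int × String × String)) : Bool :=
  (PySem.Set.ofList (owm_locations.map (fun loc => (loc.2.1, loc.2.2)))).length == 1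

-- ===== PRECONDITION & SPEC =====
def Spec_is_location_combination_same_country (owm_locations : List (Int × String × String)) (out : Bool) : Prop := out = is_location_combination_same_country_alt owm_locations
instance (owm_locations : List (Int × String × String)) (out : Bool) : Decidable (Spec_is_location_combination_same_country owm_locations out) := by unfold Spec_is_location_combination_same_country; infer_instance

-- ===== CLAIM (what is proved, stated in full; the proofs are below) =====
def Claim_equal_is_location_combination_same_country : Prop := ∀ (owm_locations : List (Int × String × String)), Dom_is_location_combination_same_country owm_locations → Spec_is_location_combination_same_country owm_locations (is_location_combination_same_country owm_locations)

-- ===== LEMMAS AND PROOFS =====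

-- A's loop: the flag ends true iff it started true and every element matched.
theorem foldl_flag {α : Type} (c : α → Bool) (l : List α) (b : Bool) :
    l.foldl (fun acc x => if c x then false else acc) b = (b && l.all (fun x => !c x)) := by
  induction l generalizing b with
  | nil => simp
  | cons a l ih =>
    simp only [List.foldl_cons, List.all_cons, ih]
    by_cases h : c a = true <;> simp [h]

theorem length_foldl_add_ge {α : Type} [BEq α] (l : List α) (s : List α) :
    s.length ≤ (l.foldl PySem.Set.add s).length := by
  induction l generalizing s with
  | nil => simp
  | cons a l ih =>
    refine le_trans ?_ (ih (PySem.Set.add s a))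
    simp only [PySem.Set.add]
    split <;> simp

-- the set built from p has one element iff every later element equals p
theorem foldl_add_singleton {α : Type} [BEq α] [LawfulBEq α] (l : List α) (p : α) :
    ((l.foldl PySem.Set.add [p]).length == 1) = l.all (fun q => q == p) := by
  induction l with
  | nil => rfl
  | cons a l ih =>
    simp only [List.foldl_cons, List.all_cons]
    by_cases h : a = p
    · subst h
      have : PySem.Set.add [a] a = [a] := by simp [PySem.Set.add, PySem.Set.contains]
      rw [this, ih]; simp
    · have hb : (a == p) = false := by simp [h]
      have h2 : PySem.Set.add [p] a = [p, a] := by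
        simp [PySem.Set.add, PySem.Set.contains, hb]
      rw [h2]
      have := length_foldl_add_ge (α := α) l [p, a]
      simp only [List.length_cons, List.length_nil] at this
      have hlen : ((l.foldl PySem.Set.add [p, a]).length == 1) = false := by
        simp only [beq_eq_false_iff_ne, ne_eq]
        omega
      rw [hlen, hb]; simp

-- ===== VERDICT (by name: the statement is the Claim_ definition above) =====
theorem is_location_combination_same_country_spec : Claim_equal_is_location_combination_same_country := by
  intro xs _
  unfold Spec_is_location_combination_same_country
  unfold is_location_combination_same_country is_location_combination_same_country_alt
  match xs with
  | [] => rfl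
  | first :: rest =>
    simp only [List.map_cons]
    rw [PySem.Set.ofList_eq_foldl]
    simp only [List.foldl_cons]
    have hadd : PySem.Set.add ([] : List (String × String)) (first.2.1, first.2.2)
        = [(first.2.1, first.2.2)] := rfl
    rw [hadd, foldl_add_singleton, foldl_flag]
    simp only [List.all_map]
    have hfirst : (if (first.2.1 != first.2.1 || first.2.2 != first.2.2) = true then false else true) = true := by simp
    rw [hfirst]
    simp only [Bool.true_and]
    congr 1
    funext q
    have hq : (q.2 == first.2) = (q.2.1 == first.2.1 && q.2.2 == first.2.2) := by
      cases q.2; cases first.2; rfl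
    by_cases h1 : q.2.1 = first.2.1 <;> by_cases h2 : q.2.2 = first.2.2 <;>
      simp [h1, h2, hq, bne]
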